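-- pv_equiv track=rewrite | github.com/JazzPiece/IPD-Auto-Layout | lpd_layout.py | branch_exclusive_counts
-- ===== SOURCE A (Python) =====
-- from collections import defaultdict, deque
--
-- def branch_exclusive_counts(branch_targets, out_edges):
--     """
--     For each branch target, count nodes reachable ONLY from it (exclusive descendants).
--     The target with the most exclusive nodes is the "main" (heaviest) path.
--     """
--     def bfs(start):
--         visited, q = set(), deque([start])
--         while q:
--             n = q.popleft()
--             if n in visited:
--                 continue
--             visited.add(n)
--             for (dst, _) in out_edges.get(n, []):
--                 q.append(dst)
--         return visited
--
--     reachable = {t: bfs(t) for t in branch_targets}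
--     result = {}
--     for t in branch_targets:
--         others = set().union(*(v for k, v in reachable.items() if k != t))
--         result[t] = len(reachable[t] - others)
--     return result
-- ===== SOURCE B (Python) =====
-- from collections import Counter, deque
--
-- def branch_exclusive_counts(branch_targets, out_edges):
--     """
--     For each branch target, count nodes reachable ONLY from it.
--     One coverage Counter over all reachable sets replaces the per-target
--     union of all the other reachable sets: a node is exclusive to t
--     iff its coverage is exactly 1.
--     """
--     def bfs(start):
--         visited, q = set(), deque([start])
--         while q:
--             n = q.popleft()
--             if n in visited:
--                 continue
--             visited.add(n)
--             for (dst, _) in out_edges.get(n, []):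
--                 q.append(dst)
--         return visited
--
--     reachable = {t: bfs(t) for t in branch_targets}
--     cover = Counter()
--     for s in reachable.values():
--         for n in s:
--             cover[n] += 1
--     return {t: sum(1 for n in reachable[t] if cover[n] == 1) for t in branch_targets}
-- ===== Notes on version B (the rewrite author's own statement) =====
-- stated objective: faster
-- what changed: Instead of rebuilding, for every target, the union of all the other targets' reachable sets and taking a set difference (quadratic in the number of targets), B builds one coverage counter over all reachable sets and counts, per target, the reachable nodes with coverage exactly 1.
import Mathlib
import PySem

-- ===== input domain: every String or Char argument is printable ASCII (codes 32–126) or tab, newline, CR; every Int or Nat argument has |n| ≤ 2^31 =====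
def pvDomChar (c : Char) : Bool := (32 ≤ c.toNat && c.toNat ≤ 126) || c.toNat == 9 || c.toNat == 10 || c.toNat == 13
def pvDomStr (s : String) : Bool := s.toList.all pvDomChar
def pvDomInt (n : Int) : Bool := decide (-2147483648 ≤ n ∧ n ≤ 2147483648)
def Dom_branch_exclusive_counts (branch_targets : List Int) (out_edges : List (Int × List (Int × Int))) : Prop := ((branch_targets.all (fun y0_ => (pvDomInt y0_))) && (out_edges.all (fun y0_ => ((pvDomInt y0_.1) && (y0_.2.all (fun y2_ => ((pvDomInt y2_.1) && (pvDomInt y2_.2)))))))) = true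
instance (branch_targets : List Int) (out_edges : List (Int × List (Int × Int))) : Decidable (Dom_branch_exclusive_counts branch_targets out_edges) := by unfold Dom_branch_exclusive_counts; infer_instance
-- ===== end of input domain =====

-- B replaces A's per-target union of all OTHER reachable sets (quadratic in the number of
-- targets) by one coverage counter over all reachable sets: a node is exclusive to t iff its
-- coverage is exactly 1. Same BFS; the aggregation is the algorithmic change.

-- ===== PORT A =====
-- shared helper: the inner 'def bfs(start)' of both Pythons (identical text in Source A and Source B).
-- The while-loop over the deque is ported with a fuel bound: each loop iteration pops one
-- element, and the total number of enqueues is at most 1 (the start) plus the total number of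
-- edge pairs, so the fuel is never exhausted; the 'fuel = 0' branch is a totality guard only.
def pvBfsAux (out_edges : List (Int × List (Int × Int))) :
    Nat → PySem.Set Int → List Int → PySem.Set Int
  | _, visited, [] => visited
  | 0, visited, _ :: _ => visited
  | fuel + 1, visited, n :: rest =>
    if visited.contains n then pvBfsAux out_edges fuel visited rest
    else pvBfsAux out_edges fuel (PySem.Set.add visited n)
      (rest ++ (((PySem.Dict.mk out_edges).getD n []).map Prod.fst))

def pvBfs (out_edges : List (Int × List (Int × Int))) (start : Int) : PySem.Set Int :=
  pvBfsAux out_edges (1 + (out_edges.map (fun p => p.2.length)).sum) PySem.Set.empty [start]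

-- shared helper: 'reachable = {t: bfs(t) for t in branch_targets}' (identical line in both Pythons)
def pvReach (branch_targets : List Int) (out_edges : List (Int × List (Int × Int))) :
    PySem.Dict Int (PySem.Set Int) :=
  branch_targets.foldl (fun d t => d.insert t (pvBfs out_edges t)) PySem.Dict.empty

-- the 'for t in branch_targets' result loop of A, over the precomputed 'reachable' dict:
-- others = union of reachable[k] for k != t; result[t] = len(reachable[t] - others)
def pvResultA (branch_targets : List Int) (reachable : PySem.Dict Int (PySem.Set Int)) : List (Int × Int) :=
  (branch_targets.foldl (fun r t =>
      r.insert t (PySem.Set.len (PySem.Set.diff (reachable.getD t [])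
        (reachable.items.foldl
          (fun s p => if p.1 ≠ t then PySem.Set.union s p.2 else s) PySem.Set.empty))))
    (PySem.Dict.empty : PySem.Dict Int Int)).items

def branch_exclusive_counts (branch_targets : List Int) (out_edges : List (Int × List (Int × Int))) : List (Int × Int) :=
  pvResultA branch_targets (pvReach branch_targets out_edges)

-- ===== PORT B =====
-- 'cover = Counter(); for s in reachable.values(): for n in s: cover[n] += 1'
def pvCover (branch_targets : List Int) (out_edges : List (Int × List (Int × Int))) :
    PySem.Dict Int Int :=
  (pvReach branch_targets out_edges).values.foldl
    (fun c s => s.foldl (fun c n => c.modify n 0 (· + 1)) c) PySem.Dict.empty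

-- B's result comprehension: {t: sum(1 for n in reachable[t] if cover[n] == 1) for t in branch_targets}
def pvResultB (branch_targets : List Int) (reachable : PySem.Dict Int (PySem.Set Int))
    (cover : PySem.Dict Int Int) : List (Int × Int) :=
  (branch_targets.foldl (fun r t =>
      r.insert t ((reachable.getD t []).foldl
        (fun a n => if cover.getD n 0 = 1 then a + 1 else a) (0 : Int)))
    (PySem.Dict.empty : PySem.Dict Int Int)).items

def branch_exclusive_counts_alt (branch_targets : List Int) (out_edges : List (Int × List (Int × Int))) : List (Int × Int) :=
  pvResultB branch_targets (pvReach branch_targets out_edges) (pvCover branch_targets out_edges)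

-- ===== PRECONDITION & SPEC =====
def Spec_branch_exclusive_counts (branch_targets : List Int) (out_edges : List (Int × List (Int × Int))) (out : List (Int × Int)) : Prop := out = branch_exclusive_counts_alt branch_targets out_edges
instance (branch_targets : List Int) (out_edges : List (Int × List (Int × Int))) (out : List (Int × Int)) : Decidable (Spec_branch_exclusive_counts branch_targets out_edges out) := by unfold Spec_branch_exclusive_counts; infer_instance

-- ===== CLAIM (what is proved, stated in full; the proofs are below) =====
def Claim_equal_branch_exclusive_counts : Prop := ∀ (branch_targets : List Int) (out_edges : List (Int × List (Int × Int))), Dom_branch_exclusive_counts branch_targets out_edges → Spec_branch_exclusive_counts branch_targets out_edges (branch_exclusive_counts branch_targets out_edges)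

-- ===== LEMMAS AND PROOFS =====

-- BFS returns a Nodup list (it is built with Set.add from the empty set).
lemma pvBfsAux_nodup (oe : List (Int × List (Int × Int))) (fuel : Nat) :
    ∀ (v : PySem.Set Int) (q : List Int), v.Nodup → (pvBfsAux oe fuel v q).Nodup := by
  induction fuel with
  | zero =>
    intro v q hv
    cases q <;> simpa [pvBfsAux] using hv
  | succ fuel ih =>
    intro v q hv
    cases q with
    | nil => simpa [pvBfsAux] using hv
    | cons n rest =>
      simp only [pvBfsAux]
      by_cases h : v.contains n = true
      · rw [if_pos h]; exact ih v rest hv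
      · rw [if_neg h]; exact ih _ _ (PySem.Set.nodup_add v n hv)

lemma pvBfs_nodup (oe : List (Int × List (Int × Int))) (t : Int) : (pvBfs oe t).Nodup :=
  pvBfsAux_nodup oe _ _ _ List.nodup_nil

-- getD of a fold of inserts whose value depends only on the key
lemma getD_foldl_insert_fun {ν : Type} (f : Int → ν) (l : List Int) (d : PySem.Dict Int ν)
    (k : Int) (dflt : ν) :
    (l.foldl (fun d t => d.insert t (f t)) d).getD k dflt
      = if k ∈ l then f k else d.getD k dflt := by
  induction l generalizing d with
  | nil => simp
  | cons x xs ih =>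
    rw [List.foldl_cons, ih, PySem.Dict.getD_insert]
    by_cases hx : k ∈ xs
    · simp [hx]
    · by_cases hk : k = x <;> simp [hx, hk]

lemma getD_pvReach (bt : List Int) (oe : List (Int × List (Int × Int))) (t : Int) (ht : t ∈ bt) :
    (pvReach bt oe).getD t [] = pvBfs oe t := by
  unfold pvReach
  rw [getD_foldl_insert_fun (f := fun t => pvBfs oe t)]
  simp [ht]

lemma keys_pvReach (bt : List Int) (oe : List (Int × List (Int × Int))) :
    (pvReach bt oe).keys = PySem.Set.ofList bt := by
  unfold pvReach
  rw [PySem.Dict.keys_foldl_insert (f := fun _ t => pvBfs oe t)]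
  simp [PySem.Dict.keys_empty, PySem.Set.update_nil_left]

lemma items_pvReach (bt : List Int) (oe : List (Int × List (Int × Int))) :
    (pvReach bt oe).items = (PySem.Set.ofList bt).map (fun k => (k, pvBfs oe k)) := by
  have hnd : (pvReach bt oe).keys.Nodup := by
    rw [keys_pvReach]; exact PySem.Set.nodup_ofList bt
  rw [PySem.Dict.items_eq_map_keys _ hnd [], keys_pvReach]
  refine List.map_congr_left ?_
  intro k hk
  rw [getD_pvReach bt oe k ((PySem.Set.mem_ofList bt k).mp hk)]

-- membership in A's fold of unions
lemma mem_foldl_union (t n : Int) (items : List (Int × PySem.Set Int)) (s0 : PySem.Set Int) :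
    n ∈ items.foldl (fun s p => if p.1 ≠ t then PySem.Set.union s p.2 else s) s0
      ↔ n ∈ s0 ∨ ∃ p ∈ items, p.1 ≠ t ∧ n ∈ p.2 := by
  induction items generalizing s0 with
  | nil => simp
  | cons x xs ih =>
    rw [List.foldl_cons]
    by_cases hx : x.1 ≠ t
    · rw [if_pos hx, ih]
      simp only [PySem.Set.union, PySem.Set.mem_update, List.mem_cons]
      constructor
      · rintro (⟨h | h⟩ | ⟨p, hp, h1, h2⟩)
        · exact Or.inl h
        · exact Or.inr ⟨x, Or.inl rfl, hx, h⟩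
        · exact Or.inr ⟨p, Or.inr hp, h1, h2⟩
      · rintro (h | ⟨p, rfl | hp, h1, h2⟩)
        · exact Or.inl (Or.inl h)
        · exact Or.inl (Or.inr h2)
        · exact Or.inr ⟨p, hp, h1, h2⟩
    · rw [if_neg hx, ih]
      have hx' : x.1 = t := not_not.mp hx
      simp only [List.mem_cons]
      constructor
      · rintro (h | ⟨p, hp, h1, h2⟩)
        · exact Or.inl h
        · exact Or.inr ⟨p, Or.inr hp, h1, h2⟩
      · rintro (h | ⟨p, rfl | hp, h1, h2⟩)
        · exact Or.inl h
        · exact absurd hx' h1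
        · exact Or.inr ⟨p, hp, h1, h2⟩

-- counting n across a flatten of Nodup lists is a countP over the outer list
lemma count_flatten_map (K : List Int) (f : Int → List Int) (n : Int)
    (hf : ∀ k ∈ K, (f k).Nodup) :
    List.count n ((K.map f).flatten) = K.countP (fun k => decide (n ∈ f k)) := by
  induction K with
  | nil => simp
  | cons x xs ih =>
    simp only [List.map_cons, List.flatten_cons]
    rw [List.count_append, ih (fun k hk => hf k (List.mem_cons_of_mem _ hk)), List.countP_cons]
    by_cases hn : n ∈ f x
    · rw [List.count_eq_one_of_mem (hf x List.mem_cons_self) hn]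
      simp [hn]
      omega
    · rw [List.count_eq_zero_of_not_mem hn]
      simp [hn]

lemma getD_pvCover (bt : List Int) (oe : List (Int × List (Int × Int))) (n : Int) :
    (pvCover bt oe).getD n 0
      = ((PySem.Set.ofList bt).countP (fun k => decide (n ∈ pvBfs oe k)) : Int) := by
  unfold pvCover
  have hv : (pvReach bt oe).values = (PySem.Set.ofList bt).map (fun k => pvBfs oe k) := by
    show (pvReach bt oe).items.map (·.2) = _
    rw [items_pvReach]; simp
  rw [hv, ← List.foldl_flatten, PySem.Dict.getD_foldl_modify_add_one,
    count_flatten_map _ _ _ (fun k _ => pvBfs_nodup oe k)]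
  simp

-- on a Nodup list containing t with p t, countP p = 1 iff no other element satisfies p
lemma countP_eq_one_iff (K : List Int) (p : Int → Bool) (t : Int)
    (hnd : K.Nodup) (ht : t ∈ K) (hpt : p t = true) :
    K.countP p = 1 ↔ ∀ k ∈ K, k ≠ t → p k = false := by
  induction K with
  | nil => cases ht
  | cons x xs ih =>
    rcases List.mem_cons.mp ht with heq | hx
    · subst heq
      have htx : t ∉ xs := (List.nodup_cons.mp hnd).1
      rw [List.countP_cons, hpt, if_pos rfl]
      constructor
      · intro h k hk hkt
        have h0 : xs.countP p = 0 := by omega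
        rcases List.mem_cons.mp hk with rfl | hk'
        · exact absurd rfl hkt
        · exact Bool.eq_false_iff.mpr (List.countP_eq_zero.mp h0 k hk')
      · intro h
        have h0 : xs.countP p = 0 := List.countP_eq_zero.mpr
          (fun k hk => Bool.eq_false_iff.mp
            (h k (List.mem_cons_of_mem _ hk) (fun he => htx (he ▸ hk))))
        omega
    · have hnd' := (List.nodup_cons.mp hnd).2
      have hxt : x ≠ t := fun he => (List.nodup_cons.mp hnd).1 (he ▸ hx)
      by_cases hpx : p x = true
      · rw [List.countP_cons, hpx, if_pos rfl]
        have h1 : xs.countP p ≠ 0 := fun h0 => (List.countP_eq_zero.mp h0 t hx) hpt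
        constructor
        · intro h
          exact absurd (by omega : xs.countP p = 0) h1
        · intro h
          have hfx := h x List.mem_cons_self hxt
          rw [hpx] at hfx
          exact absurd hfx (by simp)
      · rw [List.countP_cons, if_neg hpx, Nat.add_zero, ih hnd' hx]
        constructor
        · intro h k hk hkt
          rcases List.mem_cons.mp hk with rfl | hk'
          · exact Bool.eq_false_iff.mpr hpx
          · exact h k hk' hkt
        · intro h k hk hkt
          exact h k (List.mem_cons_of_mem _ hk) hkt

-- the per-target values of the two programs agree
lemma pv_val_eq (bt : List Int) (oe : List (Int × List (Int × Int))) (t : Int) (ht : t ∈ bt) :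
    PySem.Set.len (PySem.Set.diff ((pvReach bt oe).getD t [])
      ((pvReach bt oe).items.foldl
        (fun s p => if p.1 ≠ t then PySem.Set.union s p.2 else s) PySem.Set.empty))
    = ((pvReach bt oe).getD t []).foldl
        (fun a n => if (pvCover bt oe).getD n 0 = 1 then a + 1 else a) (0 : Int) := by
  rw [getD_pvReach bt oe t ht, PySem.List.foldl_ite_add_one]
  show ((((pvBfs oe t).filter _).length : Nat) : Int) = _
  rw [← List.countP_eq_length_filter]
  have hKnd : (PySem.Set.ofList bt).Nodup := PySem.Set.nodup_ofList bt
  have hKt : t ∈ PySem.Set.ofList bt := (PySem.Set.mem_ofList bt t).mpr ht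
  have hiff : ∀ n ∈ pvBfs oe t,
      (!(PySem.Set.contains ((pvReach bt oe).items.foldl
          (fun s p => if p.1 ≠ t then PySem.Set.union s p.2 else s) PySem.Set.empty) n)) = true
        ↔ decide ((pvCover bt oe).getD n 0 = 1) = true := by
    intro n hn
    have hmem : n ∈ (pvReach bt oe).items.foldl
        (fun s p => if p.1 ≠ t then PySem.Set.union s p.2 else s) PySem.Set.empty
        ↔ ∃ k ∈ PySem.Set.ofList bt, k ≠ t ∧ n ∈ pvBfs oe k := by
      rw [mem_foldl_union, items_pvReach]
      simp [PySem.Set.empty]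
    have hone : (pvCover bt oe).getD n 0 = 1
        ↔ ∀ k ∈ PySem.Set.ofList bt, k ≠ t → n ∉ pvBfs oe k := by
      rw [getD_pvCover]
      have hcast : ((((PySem.Set.ofList bt).countP
            (fun k => decide (n ∈ pvBfs oe k)) : Nat) : Int) = 1)
          ↔ ((PySem.Set.ofList bt).countP (fun k => decide (n ∈ pvBfs oe k)) = 1) := by omega
      rw [hcast, countP_eq_one_iff _ _ t hKnd hKt (by simp [hn])]
      simp only [decide_eq_false_iff_not]
    simp only [Bool.not_eq_true', Bool.eq_false_iff, ne_eq, PySem.Set.contains_iff,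
      decide_eq_true_eq]
    rw [hmem, hone]
    constructor
    · intro h k hk hkt hnk
      exact h ⟨k, hk, hkt, hnk⟩
    · rintro h ⟨k, hk, hkt, hnk⟩
      exact h k hk hkt hnk
  rw [List.countP_congr hiff]
  simp

-- ===== VERDICT (by name: the statement is the Claim_ definition above) =====
theorem branch_exclusive_counts_spec : Claim_equal_branch_exclusive_counts := by
  intro bt oe _
  unfold Spec_branch_exclusive_counts branch_exclusive_counts branch_exclusive_counts_alt
    pvResultA pvResultB
  refine congrArg PySem.Dict.items ?_
  exact PySem.List.foldl_congr_mem _ _ _ _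
    (fun r t ht => congrArg (r.insert t) (pv_val_eq bt oe t ht))
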